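-- pv_equiv track=rewrite | github.com/valenanton-26/labo-de-datos-1C2023 | c02.py | geringoso
-- ===== SOURCE A (Python) =====
-- def geringoso(cadena):
--
--     capadepenapa = ''
--     vocales = ["a", "e", "i", "o", "u"]
--
--     for c in cadena:
--         capadepenapa += c
--         if c in vocales:
--             capadepenapa += "p"+c
--     return capadepenapa
-- ===== SOURCE B (Python) =====
-- import re
--
-- def geringoso(cadena):
--     return re.sub(r'[aeiou]', lambda m: m.group() + 'p' + m.group(), cadena)
-- ===== Notes on version B (the rewrite author's own statement) =====
-- stated objective: idiomatic
-- what changed: Replaced the explicit scan-and-accumulate character loop with a single regex substitution that rewrites each lowercase vowel v to v+'p'+v in place.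
import Mathlib
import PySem

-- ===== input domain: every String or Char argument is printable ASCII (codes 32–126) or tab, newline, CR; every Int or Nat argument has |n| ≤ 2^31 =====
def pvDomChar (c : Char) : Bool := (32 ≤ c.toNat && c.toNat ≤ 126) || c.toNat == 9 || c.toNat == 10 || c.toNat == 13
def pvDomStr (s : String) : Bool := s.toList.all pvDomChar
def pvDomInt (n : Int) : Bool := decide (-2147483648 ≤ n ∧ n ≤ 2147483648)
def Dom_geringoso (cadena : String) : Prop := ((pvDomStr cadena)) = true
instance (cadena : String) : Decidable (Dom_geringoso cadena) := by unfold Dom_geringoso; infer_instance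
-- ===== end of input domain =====

-- B replaces A's explicit accumulator loop by a per-vowel in-place substitution (regex sub in Python,
-- a per-character match expansion here); objective: idiomatic. Return values only; neither mutates.

-- ===== PORT A =====
-- A: loop over the characters, appending c, then "p"+c when c is a vowel.
def geringosoVocales : List Char := ['a', 'e', 'i', 'o', 'u']

def geringoso (cadena : String) : String :=
  String.ofList (cadena.toList.foldl
    (fun capadepenapa c =>
      let capadepenapa := capadepenapa ++ [c]
      if c ∈ geringosoVocales then capadepenapa ++ ['p', c] else capadepenapa)
    [])

-- ===== PORT B =====
-- B: each lowercase vowel match is expanded to vowel+'p'+vowel, non-matches pass through.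
def geringoso_alt (cadena : String) : String :=
  String.ofList (cadena.toList.flatMap
    (fun c => if c ∈ (['a', 'e', 'i', 'o', 'u'] : List Char) then [c, 'p', c] else [c]))

-- ===== PRECONDITION & SPEC =====
def Spec_geringoso (cadena : String) (out : String) : Prop := out = geringoso_alt cadena
instance (cadena : String) (out : String) : Decidable (Spec_geringoso cadena out) := by unfold Spec_geringoso; infer_instance

-- ===== CLAIM (what is proved, stated in full; the proofs are below) =====
def Claim_equal_geringoso : Prop := ∀ (cadena : String), Dom_geringoso cadena → Spec_geringoso cadena (geringoso cadena)

-- ===== LEMMAS AND PROOFS =====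
theorem geringoso_foldl (l : List Char) (acc : List Char) :
    l.foldl
      (fun capadepenapa c =>
        let capadepenapa := capadepenapa ++ [c]
        if c ∈ geringosoVocales then capadepenapa ++ ['p', c] else capadepenapa)
      acc
    = acc ++ l.flatMap (fun c => if c ∈ (['a', 'e', 'i', 'o', 'u'] : List Char) then [c, 'p', c] else [c]) := by
  induction l generalizing acc with
  | nil => simp
  | cons c t ih =>
    rw [List.foldl_cons, ih, List.flatMap_cons]
    by_cases h : c ∈ (['a', 'e', 'i', 'o', 'u'] : List Char) <;>
      simp [h, geringosoVocales]

-- ===== VERDICT (by name: the statement is the Claim_ definition above) =====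
theorem geringoso_spec : Claim_equal_geringoso := by
  intro cadena _
  unfold Spec_geringoso geringoso geringoso_alt
  rw [geringoso_foldl]
  simp
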